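-- pv_equiv track=rewrite | github.com/Peter-Fadeev/all | 13.py | hg
-- ===== SOURCE A (Python) =====
-- def zp(t):
--     ui=""
--     for gg in t:
--         if gg not in ",.!?;-":
--             ui=ui+gg
--     return ui
--
-- def ind(text,s):
--     kl=0
--     for cc in text:
--         if cc==s:
--             return kl
--         else:
--             kl=kl+1
--
-- def hg(txt):
--     io=[]
--     txt=zp(txt)
--     while  " "  in txt:
--         pp=ind(txt," ")
--         ll=txt[0:pp]
--         io.append(ll)
--         txt=txt[pp+1:]
--     io.append(txt)
--     return io
-- ===== SOURCE B (Python) =====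
-- def hg(txt):
--     result = []
--     cur = ""
--     for c in txt:
--         if c in ",.!?;-":
--             continue
--         if c == " ":
--             result.append(cur)
--             cur = ""
--         else:
--             cur += c
--     result.append(cur)
--     return result
-- ===== Notes on version B (the rewrite author's own statement) =====
-- stated objective: alternative
-- what changed: Replaces A's strip pass plus repeated linear-scan-index-and-slice splitting loop with a single left-to-right tokenizing pass keeping a current-word buffer.
import Mathlib
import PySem

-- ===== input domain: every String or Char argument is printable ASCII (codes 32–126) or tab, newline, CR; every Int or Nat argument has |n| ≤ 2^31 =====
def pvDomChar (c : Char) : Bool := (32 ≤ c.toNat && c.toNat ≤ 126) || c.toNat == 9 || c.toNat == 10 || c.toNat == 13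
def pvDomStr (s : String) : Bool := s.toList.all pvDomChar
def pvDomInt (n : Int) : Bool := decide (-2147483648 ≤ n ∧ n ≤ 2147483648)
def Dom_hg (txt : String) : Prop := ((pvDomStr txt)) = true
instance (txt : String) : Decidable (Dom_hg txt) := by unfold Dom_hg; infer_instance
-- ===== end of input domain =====

-- B fuses A's punctuation-strip pass and its repeated index-and-slice splitting loop
-- into one left-to-right tokenizing pass with a current-word buffer (objective: alternative decomposition).


-- ===== PORT A =====
-- the punctuation characters ",.!?;-"
def pvPunct : List Char := [',', '.', '!', '?', ';', '-']

-- zp: strip punctuation, accumulating into ui (foldl over the characters)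
def pvZp (t : List Char) : List Char :=
  t.foldl (fun ui gg => if gg ∉ pvPunct then ui ++ [gg] else ui) []

-- ind: linear scan with a counter kl; Python returns None when s is absent
def pvInd : List Char → Char → Nat → Option Nat
  | [], _, _ => none
  | cc :: rest, s, kl => if cc = s then some kl else pvInd rest s (kl + 1)

-- the while loop of hg; the `none` branch is unreachable (guarded by ' ' ∈ t)
def pvHgLoop (t : List Char) (io : List (List Char)) : List (List Char) :=
  if h : ' ' ∈ t then
    match pvInd t ' ' 0 with
    | some pp => pvHgLoop (t.drop (pp + 1)) (io ++ [t.take pp])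
    | none => io ++ [t]
  else io ++ [t]
termination_by t.length
decreasing_by
  have : t.length > 0 := List.length_pos_of_mem h
  simp [List.length_drop]; omega

def hg (txt : String) : List String :=
  (pvHgLoop (pvZp txt.toList) []).map String.mk

-- ===== PORT B =====
-- one pass: skip punctuation, flush the current word on a space, else extend it
def pvAltLoop : List Char → List (List Char) → List Char → List (List Char)
  | [], result, cur => result ++ [cur]
  | c :: rest, result, cur =>
    if c ∈ pvPunct then pvAltLoop rest result cur
    else if c = ' ' then pvAltLoop rest (result ++ [cur]) []
    else pvAltLoop rest result (cur ++ [c])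

def hg_alt (txt : String) : List String :=
  (pvAltLoop txt.toList [] []).map String.mk

-- ===== PRECONDITION & SPEC =====
def Spec_hg (txt : String) (out : List String) : Prop := out = hg_alt txt
instance (txt : String) (out : List String) : Decidable (Spec_hg txt out) := by unfold Spec_hg; infer_instance

-- ===== CLAIM (what is proved, stated in full; the proofs are below) =====
def Claim_equal_hg : Prop := ∀ (txt : String), Dom_hg txt → Spec_hg txt (hg txt)

-- ===== LEMMAS AND PROOFS =====

theorem pvZp_eq_filter (t : List Char) :
    pvZp t = t.filter (fun c => !(pvPunct.contains c)) := by
  suffices h : ∀ acc, t.foldl (fun ui gg => if gg ∉ pvPunct then ui ++ [gg] else ui) acc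
      = acc ++ t.filter (fun c => !(pvPunct.contains c)) by
    simpa [pvZp] using h []
  induction t with
  | nil => intro acc; simp
  | cons c rest ih =>
    intro acc
    by_cases hc : c ∈ pvPunct
    · simp only [List.foldl_cons, if_neg (not_not_intro hc)]
      rw [ih]
      simp [hc]
    · simp only [List.foldl_cons, if_pos hc]
      rw [ih]
      simp [hc]

theorem pvInd_append (cur r : List Char) (hcur : ' ' ∉ cur) :
    ∀ kl, pvInd (cur ++ ' ' :: r) ' ' kl = some (kl + cur.length) := by
  induction cur with
  | nil => intro kl; simp [pvInd]
  | cons c rest ih =>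
    intro kl
    have hc : c ≠ ' ' := by intro h; exact hcur (h ▸ List.mem_cons_self ..)
    have hrest : ' ' ∉ rest := fun h => hcur (List.mem_cons_of_mem _ h)
    simp only [List.cons_append, pvInd, if_neg hc, ih hrest]
    congr 1
    simp only [List.length_cons]
    omega

theorem pvHgLoop_no_space (t : List Char) (io : List (List Char)) (h : ' ' ∉ t) :
    pvHgLoop t io = io ++ [t] := by
  rw [pvHgLoop]
  simp [h]

theorem pvHgLoop_split (cur r : List Char) (io : List (List Char)) (hcur : ' ' ∉ cur) :
    pvHgLoop (cur ++ ' ' :: r) io = pvHgLoop r (io ++ [cur]) := by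
  rw [pvHgLoop]
  have hmem : ' ' ∈ cur ++ ' ' :: r := by simp
  rw [dif_pos hmem, pvInd_append cur r hcur 0]
  show pvHgLoop ((cur ++ ' ' :: r).drop (0 + cur.length + 1))
      (io ++ [(cur ++ ' ' :: r).take (0 + cur.length)]) = pvHgLoop r (io ++ [cur])
  have htake : (cur ++ ' ' :: r).take (0 + cur.length) = cur := by
    simpa using List.take_left (l₁ := cur) (l₂ := ' ' :: r)
  have hdrop : (cur ++ ' ' :: r).drop (0 + cur.length + 1) = r := by
    have : cur ++ ' ' :: r = (cur ++ [' ']) ++ r := by simp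
    rw [this]
    have := List.drop_left (l₁ := cur ++ [' ']) (l₂ := r)
    simpa using this
  rw [htake, hdrop]

theorem pvMain (cs : List Char) : ∀ (cur : List Char) (res : List (List Char)),
    ' ' ∉ cur →
    pvHgLoop (cur ++ cs.filter (fun c => !(pvPunct.contains c))) res = pvAltLoop cs res cur := by
  induction cs with
  | nil =>
    intro cur res hcur
    simp [pvAltLoop, pvHgLoop_no_space cur res hcur]
  | cons c rest ih =>
    intro cur res hcur
    by_cases hp : c ∈ pvPunct
    · have hfilter : (c :: rest).filter (fun c => !(pvPunct.contains c))
          = rest.filter (fun c => !(pvPunct.contains c)) := by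
        simp [List.filter, hp]
      rw [hfilter, ih cur res hcur]
      simp [pvAltLoop, hp]
    · have hfilter : (c :: rest).filter (fun c => !(pvPunct.contains c))
          = c :: rest.filter (fun c => !(pvPunct.contains c)) := by
        simp [List.filter, hp]
      rw [hfilter]
      by_cases hsp : c = ' '
      · subst hsp
        rw [pvHgLoop_split cur _ res hcur]
        have h2 := ih [] (res ++ [cur]) (by simp)
        simp only [List.nil_append] at h2
        rw [h2]
        simp [pvAltLoop, hp]
      · have : cur ++ c :: rest.filter (fun c => !(pvPunct.contains c))
            = (cur ++ [c]) ++ rest.filter (fun c => !(pvPunct.contains c)) := by simp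
        rw [this, ih (cur ++ [c]) res (by simp [hcur, Ne.symm hsp])]
        simp [pvAltLoop, hp, hsp]

-- ===== VERDICT (by name: the statement is the Claim_ definition above) =====
theorem hg_spec : Claim_equal_hg := by
  intro txt _
  unfold Spec_hg hg hg_alt
  rw [pvZp_eq_filter]
  have h := pvMain txt.toList [] [] (by simp)
  simp only [List.nil_append] at h
  rw [h]
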